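-- pv_equiv track=rewrite | github.com/AlfredoMontero/Code-Jam-2018 | Qualification_Round/Saving_The_Universe_Again.py | calculate_damage
-- ===== SOURCE A (Python) =====
-- def calculate_damage(p):
--     plst = list(p)
--     damage = 0
--     multiplier = 1
--     for i in reversed(plst):
--         if i == "C":
--             multiplier *= 2
--         else:
--             damage += multiplier
--     return damage
-- ===== SOURCE B (Python) =====
-- def calculate_damage(p):
--     # Horner-style forward evaluation: each 'C' doubles every earlier shot's
--     # eventual contribution, so double the accumulator; each shot adds 1.
--     damage = 0
--     for ch in p:
--         damage = damage * 2 if ch == "C" else damage + 1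
--     return damage
-- ===== Notes on version B (the rewrite author's own statement) =====
-- stated objective: simpler
-- what changed: B evaluates the damage Horner-style in one forward pass with a single accumulator (double on 'C', add 1 per shot), eliminating A's string reversal and the separate multiplier state.
import Mathlib
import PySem

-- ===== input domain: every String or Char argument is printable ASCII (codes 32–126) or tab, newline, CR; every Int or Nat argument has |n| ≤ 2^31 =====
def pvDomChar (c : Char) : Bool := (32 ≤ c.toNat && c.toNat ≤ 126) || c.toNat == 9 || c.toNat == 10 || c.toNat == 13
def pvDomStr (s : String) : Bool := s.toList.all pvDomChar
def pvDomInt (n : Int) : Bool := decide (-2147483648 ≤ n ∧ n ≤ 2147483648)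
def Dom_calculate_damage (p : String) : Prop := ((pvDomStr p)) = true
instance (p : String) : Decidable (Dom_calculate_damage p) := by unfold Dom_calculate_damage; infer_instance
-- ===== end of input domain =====

-- B replaces A's reverse scan with its (damage, multiplier) pair by a single-accumulator
-- forward Horner evaluation: double on 'C', add 1 per shot (objective: simpler).

-- ===== PORT A =====
-- reversed loop over list(p), state (damage, multiplier)
def calculate_damage (p : String) : Int :=
  (p.toList.reverse.foldl
    (fun s i => if i = 'C' then (s.1, s.2 * 2) else (s.1 + s.2, s.2))
    ((0 : Int), (1 : Int))).1

-- ===== PORT B =====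
-- forward pass, one Int accumulator
def calculate_damage_alt (p : String) : Int :=
  p.toList.foldl (fun damage ch => if ch = 'C' then damage * 2 else damage + 1) 0

-- ===== PRECONDITION & SPEC =====
def Spec_calculate_damage (p : String) (out : Int) : Prop := out = calculate_damage_alt p
instance (p : String) (out : Int) : Decidable (Spec_calculate_damage p out) := by unfold Spec_calculate_damage; infer_instance

-- ===== CLAIM (what is proved, stated in full; the proofs are below) =====
def Claim_equal_calculate_damage : Prop := ∀ (p : String), Dom_calculate_damage p → Spec_calculate_damage p (calculate_damage p)

-- ===== LEMMAS AND PROOFS =====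

-- reference value: each shot contributes 2 ^ (number of 'C' after it)
def pvT : List Char → Int
  | [] => 0
  | c :: t => if c = 'C' then pvT t else 2 ^ (t.count 'C') + pvT t

theorem pvA_foldr (l : List Char) (d m : Int) :
    l.foldr (fun c s => if c = 'C' then (s.1, s.2 * 2) else (s.1 + s.2, s.2)) (d, m)
      = (d + m * pvT l, m * 2 ^ (l.count 'C')) := by
  induction l generalizing d m with
  | nil => simp [pvT]
  | cons c t ih =>
    by_cases h : c = 'C' <;> simp [pvT, h, ih] <;> ring

theorem pvB_foldl (l : List Char) (d : Int) :
    l.foldl (fun damage ch => if ch = 'C' then damage * 2 else damage + 1) d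
      = d * 2 ^ (l.count 'C') + pvT l := by
  induction l generalizing d with
  | nil => simp [pvT]
  | cons c t ih =>
    by_cases h : c = 'C' <;>
      simp only [List.foldl_cons, h, if_pos, ite_false, pvT, List.count_cons, ih] <;>
      simp [h] <;> ring

-- ===== VERDICT (by name: the statement is the Claim_ definition above) =====
theorem calculate_damage_spec : Claim_equal_calculate_damage := by
  intro p _
  unfold Spec_calculate_damage calculate_damage calculate_damage_alt
  rw [List.foldl_reverse, pvB_foldl,
    show (p.toList.foldr (fun c (s : Int × Int) => if c = 'C' then (s.1, s.2 * 2) else (s.1 + s.2, s.2)) (0, 1)) = (0 + 1 * pvT p.toList, 1 * 2 ^ (p.toList.count 'C')) from pvA_foldr _ _ _]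
  ring
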